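-- pv_equiv track=rewrite | github.com/damn-ice/dsa-practice | dynamic_programming.py | is_pattern_contained_in_grid
-- ===== SOURCE A (Python) =====
-- def is_pattern_contained_in_grid(grid: list[list], S: list) -> bool:
--     def is_pattern_suffix_contained_starting_at_xy(x, y, offset):
--         if len(S) == offset:
--             # Nothing left to complete...
--             return True
--
--         if (
--             (0 <= x < len(grid) and 0 <= y < len(grid[x]))
--             and grid[x][y] == S[offset]
--             and (x, y, offset) not in previous_attempts
--             and any(
--                 is_pattern_suffix_contained_starting_at_xy(x + a, y + b, offset + 1)
--                 for a, b in ((-1, 0), (1, 0), (0, -1), (0, 1))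
--             )
--         ):
--             return True
--
--         previous_attempts.add((x, y, offset))
--         return False
--
--     previous_attempts = set()
--     return any(
--         is_pattern_suffix_contained_starting_at_xy(i, j, 0)
--         for i in range(len(grid))
--         for j in range(len(grid[i]))
--     )
-- ===== SOURCE B (Python) =====
-- def is_pattern_contained_in_grid(grid: list[list], S: list) -> bool:
--     # Bottom-up DP over the pattern index: reachable-cell sets, no per-start recursion.
--     if not S:
--         return any(len(row) > 0 for row in grid)
--     M = {(x, y) for x, row in enumerate(grid) for y, v in enumerate(row) if v == S[-1]}
--     for k in range(len(S) - 2, -1, -1):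
--         M = {(x, y) for x, row in enumerate(grid) for y, v in enumerate(row)
--              if v == S[k] and any((x + a, y + b) in M for a, b in ((-1, 0), (1, 0), (0, -1), (0, 1)))}
--     return bool(M)
-- ===== Notes on version B (the rewrite author's own statement) =====
-- stated objective: alternative
-- what changed: Replaced the memoized per-start-cell recursive DFS with a bottom-up DP over the pattern index that iterates reachable-cell sets from the last pattern element to the first.
import Mathlib
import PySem

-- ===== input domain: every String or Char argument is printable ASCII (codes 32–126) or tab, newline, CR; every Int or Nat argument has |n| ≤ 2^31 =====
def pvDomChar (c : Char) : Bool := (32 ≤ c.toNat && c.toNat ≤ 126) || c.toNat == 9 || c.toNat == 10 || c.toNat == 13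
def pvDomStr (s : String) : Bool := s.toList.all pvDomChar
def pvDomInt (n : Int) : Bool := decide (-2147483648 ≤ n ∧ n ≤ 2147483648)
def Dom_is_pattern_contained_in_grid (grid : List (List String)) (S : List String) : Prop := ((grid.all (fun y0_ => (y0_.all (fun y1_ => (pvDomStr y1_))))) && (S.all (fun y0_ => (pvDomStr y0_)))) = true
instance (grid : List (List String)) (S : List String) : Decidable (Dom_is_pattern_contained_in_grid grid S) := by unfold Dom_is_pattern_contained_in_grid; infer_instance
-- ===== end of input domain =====

-- B replaces A's memoized per-start-cell DFS by a bottom-up DP over the pattern index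
-- (reachable-cell sets); return value only, equivalence on all inputs.

-- ===== PORT A =====
-- the four neighbour offsets, in Python's order
def pvDirs : List (Int × Int) := [(-1, 0), (1, 0), (0, -1), (0, 1)]

-- Python's lazy `any(...)` over a generator that mutates `previous_attempts`:
-- evaluate left to right, threading the state, stopping at the first True.
def pvAnyThread {σ : Type} (f : Int × Int → σ → Bool × σ) : List (Int × Int) → σ → Bool × σ
  | [], st => (false, st)
  | d :: ds, st =>
    let r := f d st
    if r.1 then (true, r.2) else pvAnyThread f ds r.2

-- is_pattern_suffix_contained_starting_at_xy; fuel = len(S) - offset (the fuel-0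
-- non-`S.length = offset` branch is unreachable).  Indexing is done with getD only
-- AFTER the same bounds tests Python makes, so it is exact.
def pvGoA (grid : List (List String)) (S : List String) :
    Nat → Int → Int → Nat → PySem.Set (Int × Int × Nat) →
      Bool × PySem.Set (Int × Int × Nat)
  | 0, _, _, offset, prev =>
    if S.length = offset then (true, prev) else (false, prev)
  | fuel + 1, x, y, offset, prev =>
    if S.length = offset then (true, prev)
    else
      let row := grid.getD x.toNat []
      if (decide (0 ≤ x) && decide (x < (grid.length : Int)) &&
          decide (0 ≤ y) && decide (y < (row.length : Int))) &&
          (row.getD y.toNat "" == S.getD offset "") &&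
          !(prev.contains (x, y, offset)) then
        let r := pvAnyThread
          (fun d st => pvGoA grid S fuel (x + d.1) (y + d.2) (offset + 1) st) pvDirs prev
        if r.1 then (true, r.2)
        else (false, PySem.Set.add r.2 (x, y, offset))
      else (false, PySem.Set.add prev (x, y, offset))

-- `for i in range(len(grid)) for j in range(len(grid[i]))`
def pvStarts (grid : List (List String)) : List (Int × Int) :=
  (List.range grid.length).flatMap
    (fun (i : Nat) => (List.range (grid.getD i []).length).map
      (fun (j : Nat) => ((i : Int), (j : Int))))

def is_pattern_contained_in_grid (grid : List (List String)) (S : List String) : Bool :=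
  (pvAnyThread (fun p st => pvGoA grid S S.length p.1 p.2 0 st)
      (pvStarts grid) PySem.Set.empty).1

-- ===== PORT B =====
-- cells of the grid whose value equals c (as a Python set of coordinate pairs)
def pvCellsB (grid : List (List String)) (c : String) : PySem.Set (Int × Int) :=
  PySem.Set.ofList ((PySem.List.enumerate grid).flatMap (fun xrow =>
    ((PySem.List.enumerate xrow.2).filter (fun yv => yv.2 == c)).map
      (fun yv => (xrow.1, yv.1))))

-- one DP step: cells matching c with a 4-adjacent neighbour in M
def pvStepB (grid : List (List String)) (c : String) (M : PySem.Set (Int × Int)) :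
    PySem.Set (Int × Int) :=
  PySem.Set.ofList ((PySem.List.enumerate grid).flatMap (fun xrow =>
    ((PySem.List.enumerate xrow.2).filter (fun yv =>
        yv.2 == c && pvDirs.any (fun d => M.contains (xrow.1 + d.1, yv.1 + d.2)))).map
      (fun yv => (xrow.1, yv.1))))

def is_pattern_contained_in_grid_alt (grid : List (List String)) (S : List String) : Bool :=
  match S with
  | [] => grid.any (fun row => !row.isEmpty)
  | _ =>
    let M0 := pvCellsB grid (S.getD (S.length - 1) "")
    let M := (List.range (S.length - 1)).reverse.foldl
      (fun M k => pvStepB grid (S.getD k "") M) M0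
    !M.isEmpty

-- ===== PRECONDITION & SPEC =====
def Spec_is_pattern_contained_in_grid (grid : List (List String)) (S : List String) (out : Bool) : Prop := out = is_pattern_contained_in_grid_alt grid S
instance (grid : List (List String)) (S : List String) (out : Bool) : Decidable (Spec_is_pattern_contained_in_grid grid S out) := by unfold Spec_is_pattern_contained_in_grid; infer_instance

-- ===== CLAIM (what is proved, stated in full; the proofs are below) =====
def Claim_equal_is_pattern_contained_in_grid : Prop := ∀ (grid : List (List String)) (S : List String), Dom_is_pattern_contained_in_grid grid S → Spec_is_pattern_contained_in_grid grid S (is_pattern_contained_in_grid grid S)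

-- ===== LEMMAS AND PROOFS =====

-- in-bounds test, as A writes it
def pvInb (grid : List (List String)) (x y : Int) : Bool :=
  decide (0 ≤ x) && decide (x < (grid.length : Int)) &&
  decide (0 ≤ y) && decide (y < (((grid.getD x.toNat []).length : Nat) : Int))

def pvMatch (grid : List (List String)) (c : String) (x y : Int) : Bool :=
  pvInb grid x y && ((grid.getD x.toNat []).getD y.toNat "" == c)

-- the pure (memo-free) meaning of A's recursion, fuel = S.length - offset
def pvPure (grid : List (List String)) (S : List String) :
    Nat → Int → Int → Nat → Bool
  | 0, _, _, o => decide (S.length = o)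
  | fuel + 1, x, y, o =>
    if S.length = o then true
    else
      pvMatch grid (S.getD o "") x y &&
      pvDirs.any (fun d => pvPure grid S fuel (x + d.1) (y + d.2) (o + 1))

-- memo-set invariant: every recorded triple is a genuine failure
def pvInv (grid : List (List String)) (S : List String)
    (st : PySem.Set (Int × Int × Nat)) : Prop :=
  ∀ p ∈ st, p.2.2 < S.length ∧
    pvPure grid S (S.length - p.2.2) p.1 p.2.1 p.2.2 = false

theorem pvInv_add (grid : List (List String)) (S : List String)
    (st : PySem.Set (Int × Int × Nat)) (x y : Int) (o : Nat)
    (hst : pvInv grid S st) (ho : o < S.length)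
    (hp : pvPure grid S (S.length - o) x y o = false) :
    pvInv grid S (PySem.Set.add st (x, y, o)) := by
  intro p hpmem
  rcases (PySem.Set.mem_add _ _ _).1 hpmem with h | h
  · exact hst p h
  · subst h; exact ⟨ho, hp⟩

theorem pvGoA_succ (grid : List (List String)) (S : List String)
    (fuel : Nat) (x y : Int) (o : Nat) (st : PySem.Set (Int × Int × Nat))
    (hlen : ¬ S.length = o) :
    pvGoA grid S (fuel + 1) x y o st =
      if pvMatch grid (S.getD o "") x y && !(st.contains (x, y, o)) then
        (let r := pvAnyThread
            (fun d st => pvGoA grid S fuel (x + d.1) (y + d.2) (o + 1) st) pvDirs st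
         if r.1 then (true, r.2)
         else (false, PySem.Set.add r.2 (x, y, o)))
      else (false, PySem.Set.add st (x, y, o)) := by
  simp only [pvGoA, pvMatch, pvInb]
  rw [if_neg hlen]

theorem goA_correct (grid : List (List String)) (S : List String) :
    ∀ (fuel : Nat) (x y : Int) (o : Nat) st, o + fuel = S.length →
      pvInv grid S st →
      (pvGoA grid S fuel x y o st).1 = pvPure grid S fuel x y o ∧
      pvInv grid S (pvGoA grid S fuel x y o st).2 := by
  intro fuel
  induction fuel with
  | zero =>
    intro x y o st h hst
    have hlen : S.length = o := by omega
    simp [pvGoA, pvPure, hlen, hst]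
  | succ fuel ih =>
    intro x y o st h hst
    by_cases hlen : S.length = o
    · simp [pvGoA, pvPure, hlen, hst]
    · have ho : o < S.length := by omega
      have hfo : S.length - o = fuel + 1 := by omega
      have hpure : pvPure grid S (fuel + 1) x y o =
          (pvMatch grid (S.getD o "") x y &&
            pvDirs.any (fun d => pvPure grid S fuel (x + d.1) (y + d.2) (o + 1))) := by
        simp [pvPure, hlen]
      have hany : ∀ (ds : List (Int × Int)) (st' : PySem.Set (Int × Int × Nat)),
          pvInv grid S st' →
          (pvAnyThread (fun d st => pvGoA grid S fuel (x + d.1) (y + d.2) (o + 1) st) ds st').1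
            = ds.any (fun d => pvPure grid S fuel (x + d.1) (y + d.2) (o + 1)) ∧
          pvInv grid S
            (pvAnyThread (fun d st => pvGoA grid S fuel (x + d.1) (y + d.2) (o + 1) st) ds st').2 := by
        intro ds
        induction ds with
        | nil => intro st' hst'; simpa [pvAnyThread] using hst'
        | cons d ds ihd =>
          intro st' hst'
          obtain ⟨h1, h2⟩ := ih (x + d.1) (y + d.2) (o + 1) st' (by omega) hst'
          by_cases hb : pvPure grid S fuel (x + d.1) (y + d.2) (o + 1) = true
          · simp [pvAnyThread, h1, hb, h2]
          · rw [Bool.not_eq_true] at hb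
            obtain ⟨h3, h4⟩ := ihd _ h2
            simp [pvAnyThread, h1, hb, h3, h4]
      rw [pvGoA_succ grid S fuel x y o st hlen]
      by_cases hC : pvMatch grid (S.getD o "") x y = true
      · by_cases hmem : (x, y, o) ∈ st
        · have hcont : st.contains (x, y, o) = true := (PySem.Set.contains_iff _ _).2 hmem
          have hfail := (hst _ hmem).2
          rw [hfo] at hfail
          simp only [hC, hcont, Bool.not_true, Bool.and_false, Bool.false_eq_true, if_false]
          exact ⟨hfail.symm, pvInv_add grid S st x y o hst ho (by rw [hfo]; exact hfail)⟩
        · have hcont : st.contains (x, y, o) = false := by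
            rw [← Bool.not_eq_true]; intro hc; exact hmem ((PySem.Set.contains_iff _ _).1 hc)
          obtain ⟨h1, h2⟩ := hany pvDirs st hst
          simp only [hC, hcont, Bool.not_false, Bool.and_true, if_true]
          by_cases hr : (pvAnyThread (fun d st => pvGoA grid S fuel (x + d.1) (y + d.2) (o + 1) st) pvDirs st).1 = true
          · simp only [hr, if_true]
            refine ⟨?_, h2⟩
            rw [hpure, hC, ← h1, hr]
            rfl
          · rw [Bool.not_eq_true] at hr
            simp only [hr, Bool.false_eq_true, if_false]
            have hfalse : pvPure grid S (fuel + 1) x y o = false := by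
              rw [hpure, hC, ← h1, hr]; rfl
            exact ⟨hfalse.symm, pvInv_add grid S _ x y o h2 ho (by rw [hfo]; exact hfalse)⟩
      · rw [Bool.not_eq_true] at hC
        have hfalse : pvPure grid S (fuel + 1) x y o = false := by
          rw [hpure, hC]; rfl
        simp only [hC, Bool.false_and, Bool.false_eq_true, if_false]
        exact ⟨hfalse.symm, pvInv_add grid S st x y o hst ho (by rw [hfo]; exact hfalse)⟩

theorem anyThread_starts (grid : List (List String)) (S : List String) :
    ∀ (ps : List (Int × Int)) st, pvInv grid S st →
      (pvAnyThread (fun p st => pvGoA grid S S.length p.1 p.2 0 st) ps st).1 =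
        ps.any (fun p => pvPure grid S S.length p.1 p.2 0) := by
  intro ps
  induction ps with
  | nil => intro st _; simp [pvAnyThread]
  | cons p ps ihp =>
    intro st hst
    obtain ⟨h1, h2⟩ := goA_correct grid S S.length p.1 p.2 0 st (by omega) hst
    by_cases hb : pvPure grid S S.length p.1 p.2 0 = true
    · simp [pvAnyThread, h1, hb]
    · rw [Bool.not_eq_true] at hb
      simp [pvAnyThread, h1, hb, ihp _ h2]

-- membership in a grid comprehension: in-bounds cell whose (coords, value) satisfy q
theorem mem_comp (grid : List (List String)) (q : Int → Int → String → Bool) (p : Int × Int) :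
    p ∈ (PySem.List.enumerate grid).flatMap (fun xrow =>
        ((PySem.List.enumerate xrow.2).filter (fun yv => q xrow.1 yv.1 yv.2)).map
          (fun yv => (xrow.1, yv.1))) ↔
      pvInb grid p.1 p.2 = true ∧
      q p.1 p.2 ((grid.getD p.1.toNat []).getD p.2.toNat "") = true := by
  rw [List.mem_flatMap]
  constructor
  · rintro ⟨xrow, hx, hp⟩
    rw [List.mem_map] at hp
    obtain ⟨yv, hyv, hpeq⟩ := hp
    rw [List.mem_filter] at hyv
    obtain ⟨hyv, hq⟩ := hyv
    rw [PySem.List.mem_enumerate_iff] at hx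
    obtain ⟨i, hi, hxe⟩ := hx
    rw [PySem.List.mem_enumerate_iff] at hyv
    obtain ⟨j, hj, hye⟩ := hyv
    subst hxe; subst hpeq
    rw [hye] at hq ⊢
    simp only [zero_add] at hq ⊢
    have hrow : grid.getD i [] = grid[i] := List.getD_eq_getElem grid [] hi
    have hcell : grid[i].getD j "" = grid[i][j] := List.getD_eq_getElem grid[i] "" hj
    refine ⟨?_, ?_⟩
    · simp only [pvInb, Int.toNat_natCast, hrow]
      simp only [Bool.and_eq_true, decide_eq_true_eq]
      refine ⟨⟨⟨by positivity, by exact_mod_cast hi⟩, by positivity⟩, by exact_mod_cast hj⟩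
    · simp only [Int.toNat_natCast]
      rw [hrow, hcell]
      exact hq
  · rintro ⟨hinb, hq⟩
    simp only [pvInb, Bool.and_eq_true, decide_eq_true_eq] at hinb
    obtain ⟨⟨⟨hx0, hxl⟩, hy0⟩, hyl⟩ := hinb
    set i := p.1.toNat with hidef
    set j := p.2.toNat with hjdef
    have hpx : p.1 = (i : Int) := (Int.toNat_of_nonneg hx0).symm
    have hpy : p.2 = (j : Int) := (Int.toNat_of_nonneg hy0).symm
    have hi : i < grid.length := by omega
    have hj : j < (grid.getD i []).length := by omega
    have hrow : grid.getD i [] = grid[i] := List.getD_eq_getElem grid [] hi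
    rw [hrow] at hj
    refine ⟨((i : Int), grid[i]), ?_, ?_⟩
    · rw [PySem.List.mem_enumerate_iff]
      exact ⟨i, hi, by simp⟩
    · rw [List.mem_map]
      refine ⟨((j : Int), grid[i][j]), ?_, ?_⟩
      · rw [List.mem_filter]
        refine ⟨?_, ?_⟩
        · rw [PySem.List.mem_enumerate_iff]
          exact ⟨j, hj, by simp⟩
        · have hcell : grid[i].getD j "" = grid[i][j] := List.getD_eq_getElem grid[i] "" hj
          rw [hrow, hcell] at hq
          show q (↑i) (↑j) grid[i][j] = true
          rw [← hpx, ← hpy]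
          exact hq
      · rw [Prod.ext_iff]; exact ⟨hpx.symm, hpy.symm⟩
  
theorem mem_cellsB (grid : List (List String)) (c : String) (p : Int × Int) :
    p ∈ pvCellsB grid c ↔ pvMatch grid c p.1 p.2 = true := by
  have h := mem_comp grid (fun _ _ v => v == c) p
  rw [pvCellsB, PySem.Set.mem_ofList]
  exact h.trans (by rw [pvMatch, Bool.and_eq_true])

theorem mem_stepB (grid : List (List String)) (c : String)
    (M : PySem.Set (Int × Int)) (p : Int × Int) :
    p ∈ pvStepB grid c M ↔
      (pvMatch grid c p.1 p.2 && pvDirs.any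
        (fun d => M.contains (p.1 + d.1, p.2 + d.2))) = true := by
  have h := mem_comp grid
    (fun x y v => v == c && pvDirs.any (fun d => M.contains (x + d.1, y + d.2))) p
  rw [pvStepB, PySem.Set.mem_ofList]
  exact h.trans (by rw [pvMatch]; simp only [Bool.and_eq_true, and_assoc])

theorem mem_starts (grid : List (List String)) (p : Int × Int) :
    p ∈ pvStarts grid ↔ pvInb grid p.1 p.2 = true := by
  rw [pvStarts, List.mem_flatMap]
  constructor
  · rintro ⟨i, hi, hp⟩
    rw [List.mem_range] at hi
    rw [List.mem_map] at hp
    obtain ⟨j, hj, hpe⟩ := hp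
    rw [List.mem_range] at hj
    subst hpe
    simp only [pvInb, Int.toNat_natCast, Bool.and_eq_true, decide_eq_true_eq]
    exact ⟨⟨⟨by positivity, by exact_mod_cast hi⟩, by positivity⟩, by exact_mod_cast hj⟩
  · intro hinb
    simp only [pvInb, Bool.and_eq_true, decide_eq_true_eq] at hinb
    obtain ⟨⟨⟨hx0, hxl⟩, hy0⟩, hyl⟩ := hinb
    refine ⟨p.1.toNat, by rw [List.mem_range]; omega, ?_⟩
    rw [List.mem_map]
    refine ⟨p.2.toNat, by rw [List.mem_range]; omega, ?_⟩
    rw [Prod.ext_iff]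
    exact ⟨Int.toNat_of_nonneg hx0, Int.toNat_of_nonneg hy0⟩

theorem pure_inb (grid : List (List String)) (S : List String)
    (fuel : Nat) (x y : Int) (o : Nat) (h : ¬ S.length = o)
    (hp : pvPure grid S (fuel + 1) x y o = true) : pvInb grid x y = true := by
  simp only [pvPure, if_neg h, Bool.and_eq_true, pvMatch] at hp
  exact hp.1.1

theorem foldB_inv (grid : List (List String)) (S : List String) :
    ∀ (n : Nat) (M : PySem.Set (Int × Int)), n + 1 ≤ S.length →
      (∀ p : Int × Int, p ∈ M ↔ pvPure grid S (S.length - n) p.1 p.2 n = true) →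
      ∀ p : Int × Int,
        p ∈ (List.range n).reverse.foldl (fun M k => pvStepB grid (S.getD k "") M) M ↔
          pvPure grid S S.length p.1 p.2 0 = true := by
  intro n
  induction n with
  | zero => intro M _ hM p; simpa using hM p
  | succ n ihn =>
    intro M h hM p
    have hrev : (List.range (n + 1)).reverse = n :: (List.range n).reverse := by
      rw [List.range_succ, List.reverse_append]; rfl
    rw [hrev]
    simp only [List.foldl_cons]
    apply ihn _ (by omega)
    intro q
    rw [mem_stepB]
    have hc : ∀ d : Int × Int, M.contains (q.1 + d.1, q.2 + d.2) =
        pvPure grid S (S.length - (n + 1)) (q.1 + d.1) (q.2 + d.2) (n + 1) := by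
      intro d
      rw [Bool.eq_iff_iff, PySem.Set.contains_iff]
      exact hM (q.1 + d.1, q.2 + d.2)
    simp only [hc]
    have hm : S.length - n = (S.length - (n + 1)) + 1 := by omega
    rw [hm]
    simp only [pvPure]
    rw [if_neg (by omega : ¬ S.length = n)]

theorem altB_char (grid : List (List String)) (S : List String) (hS : S ≠ []) :
    is_pattern_contained_in_grid_alt grid S =
      !((List.range (S.length - 1)).reverse.foldl
          (fun M k => pvStepB grid (S.getD k "") M)
          (pvCellsB grid (S.getD (S.length - 1) ""))).isEmpty := by
  cases S with
  | nil => exact absurd rfl hS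
  | cons a t => rfl

-- ===== VERDICT (by name: the statement is the Claim_ definition above) =====
theorem is_pattern_contained_in_grid_spec : Claim_equal_is_pattern_contained_in_grid := by
  intro grid S _
  show is_pattern_contained_in_grid grid S = is_pattern_contained_in_grid_alt grid S
  have hInvE : pvInv grid S PySem.Set.empty := by
    intro p hp; simp [PySem.Set.empty] at hp
  have hA : is_pattern_contained_in_grid grid S =
      (pvStarts grid).any (fun p => pvPure grid S S.length p.1 p.2 0) :=
    anyThread_starts grid S (pvStarts grid) _ hInvE
  rw [hA]
  by_cases hS : S = []
  · subst hS
    show (pvStarts grid).any (fun p => pvPure grid [] 0 p.1 p.2 0) =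
      grid.any (fun row => !row.isEmpty)
    rw [Bool.eq_iff_iff, List.any_eq_true, List.any_eq_true]
    constructor
    · rintro ⟨p, hp, -⟩
      rw [mem_starts] at hp
      simp only [pvInb, Bool.and_eq_true, decide_eq_true_eq] at hp
      obtain ⟨⟨⟨hx0, hxl⟩, hy0⟩, hyl⟩ := hp
      have hi : p.1.toNat < grid.length := by omega
      refine ⟨grid[p.1.toNat], List.getElem_mem hi, ?_⟩
      have hrow : grid.getD p.1.toNat [] = grid[p.1.toNat] :=
        List.getD_eq_getElem grid [] hi
      rw [hrow] at hyl
      simp only [Bool.not_eq_true', List.isEmpty_eq_false_iff, ← List.length_pos_iff]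
      omega
    · rintro ⟨row, hrow, hne⟩
      obtain ⟨i, hi, hieq⟩ := List.mem_iff_getElem.1 hrow
      refine ⟨((i : Int), (0 : Int)), ?_, by simp [pvPure]⟩
      rw [mem_starts]
      simp only [pvInb, Int.toNat_natCast, Bool.and_eq_true, decide_eq_true_eq]
      have hrowD : grid.getD i [] = grid[i] := List.getD_eq_getElem grid [] hi
      rw [hrowD, hieq]
      simp only [Bool.not_eq_true', List.isEmpty_eq_false_iff, ← List.length_pos_iff] at hne
      refine ⟨⟨⟨by positivity, by exact_mod_cast hi⟩, le_refl 0⟩, by exact_mod_cast hne⟩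
  · have hlen1 : 1 ≤ S.length := by
      cases S with
      | nil => exact absurd rfl hS
      | cons a t => simp
    rw [altB_char grid S hS]
    have hM0 : ∀ p : Int × Int,
        p ∈ pvCellsB grid (S.getD (S.length - 1) "") ↔
          pvPure grid S (S.length - (S.length - 1)) p.1 p.2 (S.length - 1) = true := by
      intro p
      rw [mem_cellsB]
      rw [show S.length - (S.length - 1) = 1 from by omega]
      have hred : pvPure grid S 1 p.1 p.2 (S.length - 1) =
          pvMatch grid (S.getD (S.length - 1) "") p.1 p.2 := by
        simp only [pvPure]
        rw [if_neg (by omega : ¬ S.length = S.length - 1)]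
        rw [show S.length - 1 + 1 = S.length from by omega]
        simp [pvDirs]
      rw [hred]
    have hMfin := foldB_inv grid S (S.length - 1)
      (pvCellsB grid (S.getD (S.length - 1) "")) (by omega) hM0
    rw [Bool.eq_iff_iff, List.any_eq_true]
    constructor
    · rintro ⟨p, hp, hpure⟩
      have hmem := (hMfin p).2 hpure
      simp only [Bool.not_eq_true', List.isEmpty_eq_false_iff]
      exact List.ne_nil_of_mem hmem
    · intro h
      simp only [Bool.not_eq_true', List.isEmpty_eq_false_iff] at h
      obtain ⟨p, hp⟩ := List.exists_mem_of_ne_nil _ h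
      have hpure := (hMfin p).1 hp
      obtain ⟨m, hm⟩ : ∃ m, S.length = m + 1 := ⟨S.length - 1, by omega⟩
      refine ⟨p, ?_, hpure⟩
      rw [mem_starts]
      rw [hm] at hpure
      exact pure_inb grid S m p.1 p.2 0 (by omega) hpure
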